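-- pv_equiv track=rewrite | github.com/AyushM42/Toxive-Bot | responses.py | bankai_response
-- ===== SOURCE A (Python) =====
-- def bankai_response(message):
--     league_strings = ["bankai", "https://tenor.com/view/bleach-bankai-court-young-thug-thug-gif-7984140487879273755", "https://tenor.com/view/me-showing-the-class-my-bankai-gif-580868976631931335"]
--     if "bankai" in message.lower():
--         return True
--     split_strings = message.split()
--     for ss in split_strings:
--         if ss.lower() in league_strings:
--             return True
--     return False
-- ===== SOURCE B (Python) =====
-- def bankai_response(message):
--     # Every entry of A's league_strings contains "bankai", so the word loop
--     # can only fire when the substring test already fired: one check suffices.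
--     return "bankai" in message.lower()
-- ===== Notes on version B (the rewrite author's own statement) =====
-- stated objective: simpler
-- what changed: Dropped the league_strings table, split() and the word-scanning loop: every league entry contains 'bankai', so the loop can never return True unless the initial substring test already did; B is the single substring test.
import Mathlib
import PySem

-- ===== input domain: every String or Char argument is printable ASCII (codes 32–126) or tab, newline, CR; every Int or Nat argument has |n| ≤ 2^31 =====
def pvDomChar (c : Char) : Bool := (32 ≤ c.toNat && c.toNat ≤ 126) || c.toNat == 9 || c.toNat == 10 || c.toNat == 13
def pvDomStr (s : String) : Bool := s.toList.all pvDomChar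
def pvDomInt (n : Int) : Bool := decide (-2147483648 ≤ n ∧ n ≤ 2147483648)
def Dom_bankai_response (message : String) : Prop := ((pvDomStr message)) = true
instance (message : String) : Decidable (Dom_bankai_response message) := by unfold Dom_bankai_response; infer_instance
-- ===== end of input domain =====

-- B replaces A's substring test + word-scan against league_strings by the single
-- substring test, which subsumes the loop (objective: simpler).

-- ===== PORT A =====
-- the for-loop with early 'return True' over split_strings
def bankaiLoop (league : List String) : List String → Bool
  | [] => false
  | ss :: rest => if league.contains (PySem.Str.lower ss) then true else bankaiLoop league rest

def bankai_response (message : String) : Bool :=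
  let league_strings : List String := ["bankai", "https://tenor.com/view/bleach-bankai-court-young-thug-thug-gif-7984140487879273755", "https://tenor.com/view/me-showing-the-class-my-bankai-gif-580868976631931335"]
  if PySem.Str.isIn "bankai" (PySem.Str.lower message) then true
  else
    let split_strings := PySem.Str.split₀ message
    bankaiLoop league_strings split_strings

-- ===== PORT B =====
def bankai_response_alt (message : String) : Bool :=
  PySem.Str.isIn "bankai" (PySem.Str.lower message)

-- ===== PRECONDITION & SPEC =====
def Spec_bankai_response (message : String) (out : Bool) : Prop := out = bankai_response_alt message
instance (message : String) (out : Bool) : Decidable (Spec_bankai_response message out) := by unfold Spec_bankai_response; infer_instance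

-- ===== CLAIM (what is proved, stated in full; the proofs are below) =====
def Claim_equal_bankai_response : Prop := ∀ (message : String), Dom_bankai_response message → Spec_bankai_response message (bankai_response message)

-- ===== LEMMAS AND PROOFS =====

-- every word produced by split₀.go is an element of acc, or cur.reverse extended
-- by a prefix of the remaining input, or an infix of the remaining input
theorem bankai_split_go_shape (s : List Char) : ∀ (cur : List Char) (acc : List (List Char))
    (w : List Char), w ∈ PySem.Chars.split₀.go s cur acc →
    w ∈ acc ∨ (∃ pre, (w = cur.reverse ++ pre ∧ pre <+: s) ∨ (pre <:+: s ∧ w = pre)) := by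
  induction s with
  | nil =>
    intro cur acc w hw
    simp only [PySem.Chars.split₀.go] at hw
    by_cases hc : cur.isEmpty
    · simp [hc] at hw; left; simpa using hw
    · simp [hc] at hw
      rcases hw with h | h
      · left; simpa using h
      · right; exact ⟨[], Or.inl ⟨by simp [h], List.nil_prefix⟩⟩
  | cons c rest ih =>
    intro cur acc w hw
    simp only [PySem.Chars.split₀.go] at hw
    by_cases hs : PySem.Chars.isspace c
    · simp only [hs, if_true] at hw
      by_cases hc : cur.isEmpty
      · simp only [hc, if_true] at hw
        rcases ih [] acc w hw with h | ⟨pre, h | h⟩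
        · exact Or.inl h
        · right; exact ⟨pre, Or.inr ⟨(h.2.isInfix).trans (List.infix_cons (List.infix_refl rest)), by simpa using h.1⟩⟩
        · right; exact ⟨pre, Or.inr ⟨h.1.trans (List.infix_cons (List.infix_refl rest)), h.2⟩⟩
      · simp only [hc] at hw
        rcases ih [] (cur.reverse :: acc) w hw with h | ⟨pre, h | h⟩
        · rcases List.mem_cons.mp h with h | h
          · right; exact ⟨[], Or.inl ⟨by simp [h], List.nil_prefix⟩⟩
          · exact Or.inl h
        · right; exact ⟨pre, Or.inr ⟨(h.2.isInfix).trans (List.infix_cons (List.infix_refl rest)), by simpa using h.1⟩⟩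
        · right; exact ⟨pre, Or.inr ⟨h.1.trans (List.infix_cons (List.infix_refl rest)), h.2⟩⟩
    · simp only [hs] at hw
      rcases ih (c :: cur) acc w hw with h | ⟨pre, h | h⟩
      · exact Or.inl h
      · right
        refine ⟨c :: pre, Or.inl ⟨?_, List.cons_prefix_cons.mpr ⟨rfl, h.2⟩⟩⟩
        simpa using h.1
      · right; exact ⟨pre, Or.inr ⟨h.1.trans (List.infix_cons (List.infix_refl rest)), h.2⟩⟩

theorem bankai_mem_split₀_infix (s w : List Char) (hw : w ∈ PySem.Chars.split₀ s) : w <:+: s := by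
  rcases bankai_split_go_shape s [] [] w hw with h | ⟨pre, h | h⟩
  · simp at h
  · rw [h.1]; simpa using h.2.isInfix
  · rw [h.2]; exact h.1

-- if some split word lowers to a league string, 'bankai' is an infix of the lowered message
theorem bankai_loop_eq_false (message : String)
    (h : PySem.Str.isIn "bankai" (PySem.Str.lower message) = false) :
    ∀ (ws : List String), (∀ w ∈ ws, w ∈ PySem.Str.split₀ message) →
    bankaiLoop ["bankai", "https://tenor.com/view/bleach-bankai-court-young-thug-thug-gif-7984140487879273755", "https://tenor.com/view/me-showing-the-class-my-bankai-gif-580868976631931335"] ws = false := by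
  intro ws
  induction ws with
  | nil => intro _; rfl
  | cons ss rest ih =>
    intro hmem
    have hss : ss ∈ PySem.Str.split₀ message := hmem ss (by simp)
    have hinf : ss.toList <:+: message.toList := by
      apply bankai_mem_split₀_infix
      have := PySem.Str.split₀_map_toList message
      rw [← this]
      exact List.mem_map_of_mem hss
    have hlow : (PySem.Str.lower ss).toList <:+: (PySem.Str.lower message).toList := by
      rw [PySem.Str.toList_lower, PySem.Str.toList_lower]
      simpa [PySem.Chars.lower] using hinf.map PySem.Chars.lowerChar
    have hnot : ¬ ("bankai".toList <:+: (PySem.Str.lower message).toList) := by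
      intro hcon
      have htrue := (PySem.Str.isIn_iff_infix _ _).mpr hcon
      rw [h] at htrue
      exact Bool.noConfusion htrue
    simp only [bankaiLoop]
    have hct : ¬ (["bankai", "https://tenor.com/view/bleach-bankai-court-young-thug-thug-gif-7984140487879273755", "https://tenor.com/view/me-showing-the-class-my-bankai-gif-580868976631931335"] : List String).contains (PySem.Str.lower ss) := by
      intro hc
      have hmem' := List.contains_iff_mem.mp hc
      simp only [List.mem_cons, List.not_mem_nil, or_false] at hmem'
      have hb : "bankai".toList <:+: (PySem.Str.lower ss).toList := by
        rcases hmem' with hcase | hcase | hcase <;> rw [hcase] <;> decide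
      exact hnot (hb.trans hlow)
    rw [if_neg hct]
    exact ih (fun w hw => hmem w (List.mem_cons_of_mem _ hw))

-- ===== VERDICT (by name: the statement is the Claim_ definition above) =====
theorem bankai_response_spec : Claim_equal_bankai_response := by
  intro message _
  unfold Spec_bankai_response bankai_response bankai_response_alt
  by_cases h : PySem.Str.isIn "bankai" (PySem.Str.lower message) = true
  · rw [if_pos h]; exact h.symm
  · have h' : PySem.Str.isIn "bankai" (PySem.Str.lower message) = false := by
      simpa using h
    rw [if_neg h, h']
    exact bankai_loop_eq_false message h' _ (fun w hw => hw)
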